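-- pv_equiv track=rewrite | github.com/seojihwan/algorithm | Python/programmers/2020 winter/test.py | solution
-- ===== SOURCE A (Python) =====
-- def rotate(sentence, rot):
--     if rot > 0:
--         for _ in range(rot):
--             temp = sentence[0]
--             for i in range(1, len(sentence)):
--                 sentence[i-1] = sentence[i]
--             sentence[-1] = temp
--     elif rot < 0:
--         for _ in range(abs(rot)):
--             temp = sentence[-1]
--             for i in range(len(sentence)-2, -1, -1):
--                 sentence[i+1] = sentence[i]
--             sentence[0] = temp
--
-- def keytonum(key):
--     nums = []
--     temp = list(key)
--     while temp:
--         s = temp.pop(0)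
--         nums.append(ord(s)-96)
--     return nums
--
-- def solution(encrypted_text, key, rotation):
--     nums = keytonum(key)
--     enc = list(encrypted_text)
--     res = []
--
--     rotate(enc, rotation)
--     while enc:
--         s = enc.pop(0)
--         num = nums.pop(0)
--         if (ord(s)-num) < 97:
--             res.append(chr(ord(s)-num+26))
--         else:
--             res.append(chr(ord(s)-num))
--
--     answer = ''
--     for e in res:
--         answer += e
--     return answer
-- ===== SOURCE B (Python) =====
-- def solution(encrypted_text, key, rotation):
--     t = list(encrypted_text)
--     n = len(t)
--     k = rotation % n if n else 0
--     rotated = t[k:] + t[:k]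
--     out = []
--     for ch, kc in zip(rotated, key):
--         v = ord(ch) - (ord(kc) - 96)
--         out.append(chr(v + 26) if v < 97 else chr(v))
--     return ''.join(out)
-- ===== Notes on version B (the rewrite author's own statement) =====
-- stated objective: faster
-- what changed: Replaces the |rotation| repeated one-step in-place shift loops with a single modular slice (rotation % n), and the pop(0)/append decryption loops plus string-concatenation join with one zip pass and ''.join.
import Mathlib
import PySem

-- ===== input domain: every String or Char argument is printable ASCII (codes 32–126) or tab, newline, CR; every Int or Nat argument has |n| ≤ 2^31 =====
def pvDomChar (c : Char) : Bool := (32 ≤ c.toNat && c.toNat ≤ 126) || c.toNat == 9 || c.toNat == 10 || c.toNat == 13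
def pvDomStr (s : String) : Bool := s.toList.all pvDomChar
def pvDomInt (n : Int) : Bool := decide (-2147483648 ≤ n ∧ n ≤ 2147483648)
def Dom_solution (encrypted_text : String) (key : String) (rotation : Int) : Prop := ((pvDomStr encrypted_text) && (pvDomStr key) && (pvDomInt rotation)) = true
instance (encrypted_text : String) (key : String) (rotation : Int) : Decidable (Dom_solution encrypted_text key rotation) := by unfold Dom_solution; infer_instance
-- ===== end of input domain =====

-- B replaces A's element-by-element rotation loops and pop(0) scans by one modular
-- slice plus a single zip pass (objective: faster; B is the natural O(n) rewrite).


-- ===== PORT A =====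

-- 'for i in range(1, len(sentence)): sentence[i-1] = sentence[i]' — in-place writes become
-- List.set; the reads sentence[i] are always in range here, so List.getD is exact
def innerShiftL (a : List Char) (i : Nat) : List Char :=
  if _h : i < a.length then innerShiftL (a.set (i - 1) (a.getD i ' ')) (i + 1) else a
  termination_by a.length - i
  decreasing_by simp; omega

-- one iteration of the 'rot > 0' body: temp = sentence[0]; shift left; sentence[-1] = temp
def rotStepL (s : List Char) : List Char :=
  let temp := s.getD 0 ' '
  let s' := innerShiftL s 1
  s'.set (s'.length - 1) temp

-- 'for i in range(len(sentence)-2, -1, -1): sentence[i+1] = sentence[i]'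
def innerShiftR (a : List Char) (i : Int) : List Char :=
  if _h : 0 ≤ i then innerShiftR (a.set (i + 1).toNat (a.getD i.toNat ' ')) (i - 1) else a
  termination_by (i + 1).toNat
  decreasing_by omega

-- one iteration of the 'rot < 0' body: temp = sentence[-1]; shift right; sentence[0] = temp
def rotStepR (s : List Char) : List Char :=
  let temp := s.getD (s.length - 1) ' '
  let s' := innerShiftR s ((s.length : Int) - 2)
  s'.set 0 temp

def rotateA (sentence : List Char) (rot : Int) : List Char :=
  if rot > 0 then (List.range rot.toNat).foldl (fun s _ => rotStepL s) sentence
  else if rot < 0 then (List.range rot.natAbs).foldl (fun s _ => rotStepR s) sentence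
  else sentence

-- keytonum: 'while temp: s = temp.pop(0); nums.append(ord(s)-96)'
def keytonumA : List Char → List Int
  | [] => []
  | c :: rest => ((c.toNat : Int) - 96) :: keytonumA rest

-- 'while enc: s = enc.pop(0); num = nums.pop(0); …'  (Python raises IndexError when nums
-- runs out first; those inputs are excluded by Pre_solution)
def mainLoopA : List Char → List Int → List Char
  | [], _ => []
  | _ :: _, [] => []
  | c :: cs, num :: ns =>
      (if (c.toNat : Int) - num < 97 then Char.ofNat ((c.toNat : Int) - num + 26).toNat
       else Char.ofNat ((c.toNat : Int) - num).toNat) :: mainLoopA cs ns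

def solution (encrypted_text : String) (key : String) (rotation : Int) : String :=
  let nums := keytonumA key.toList
  let enc := rotateA encrypted_text.toList rotation
  let res := mainLoopA enc nums
  -- "answer = ''; for e in res: answer += e" — ported at the char-list level, String.ofList at the end
  String.ofList (res.foldl (fun acc c => acc ++ [c]) [])

-- ===== PORT B =====

def decCharB (ch kc : Char) : Char :=
  let v : Int := (ch.toNat : Int) - ((kc.toNat : Int) - 96)
  if v < 97 then Char.ofNat (v + 26).toNat else Char.ofNat v.toNat

def solution_alt (encrypted_text : String) (key : String) (rotation : Int) : String :=
  let t := encrypted_text.toList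
  let n := t.length
  let k := if n = 0 then 0 else (PySem.Int.mod rotation (n : Int)).toNat
  -- t[k:] + t[:k] with 0 ≤ k ≤ n is exactly drop/take
  let rotated := t.drop k ++ t.take k
  String.ofList (List.zipWith decCharB rotated key.toList)

-- ===== PRECONDITION & SPEC =====

-- Pre_ excludes exactly the inputs on which A raises IndexError: a key shorter than the
-- text (nums.pop(0) on an empty list) and a nonzero rotation of the empty text
-- (sentence[0] / sentence[-1] inside rotate).
def Pre_solution (encrypted_text : String) (key : String) (rotation : Int) : Prop :=
  encrypted_text.toList.length ≤ key.toList.length ∧ (encrypted_text.toList ≠ [] ∨ rotation = 0)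

instance (encrypted_text : String) (key : String) (rotation : Int) : Decidable (Pre_solution encrypted_text key rotation) := by
  unfold Pre_solution; infer_instance

def pvWitness_solution : String × String × Int := ("ab", "bc", 1)

def Spec_solution (encrypted_text : String) (key : String) (rotation : Int) (out : String) : Prop := out = solution_alt encrypted_text key rotation
instance (encrypted_text : String) (key : String) (rotation : Int) (out : String) : Decidable (Spec_solution encrypted_text key rotation out) := by unfold Spec_solution; infer_instance

-- ===== CLAIM (what is proved, stated in full; the proofs are below) =====
def Claim_equal_solution : Prop := ∀ (encrypted_text : String) (key : String) (rotation : Int), Dom_solution encrypted_text key rotation → Pre_solution encrypted_text key rotation → Spec_solution encrypted_text key rotation (solution encrypted_text key rotation)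

-- ===== LEMMAS AND PROOFS =====

lemma innerShiftL_spec : ∀ (k : Nat) (a : List Char) (i : Nat), a.length - i = k → 1 ≤ i → i ≤ a.length →
    innerShiftL a i = a.take (i - 1) ++ a.drop i ++ a.drop (a.length - 1) := by
  intro k
  induction k with
  | zero =>
    intro a i hk h1 hle
    have hin : i = a.length := by omega
    rw [innerShiftL, dif_neg (by omega)]
    subst hin
    rw [List.drop_length]
    simpa using (List.take_append_drop (a.length - 1) a).symm
  | succ k ih =>
    intro a i hk h1 hle
    have hlt : i < a.length := by omega
    rw [innerShiftL, dif_pos hlt]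
    set v := a.getD i ' ' with hv
    have hset : a.set (i-1) v = a.take (i-1) ++ v :: a.drop i := by
      rw [List.set_eq_take_append_cons_drop, if_pos (by omega)]
      have h2 : i - 1 + 1 = i := by omega
      rw [h2]
    have hlen : (a.set (i-1) v).length = a.length := by simp
    have ih' := ih (a.set (i-1) v) (i+1) (by simp; omega) (by omega) (by simp; omega)
    rw [ih', hlen]
    have hdrop : (a.set (i-1) v).drop (i+1) = a.drop (i+1) := by
      rw [List.drop_set, if_pos (by omega)]
    have hdroplast : (a.set (i-1) v).drop (a.length - 1) = a.drop (a.length - 1) := by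
      rw [List.drop_set, if_pos (by omega)]
    have htake : (a.set (i-1) v).take ((i+1)-1) = a.take (i-1) ++ [v] := by
      rw [hset, Nat.add_sub_cancel, List.take_append]
      rw [List.take_of_length_le (by simp)]
      congr 1
      have : i - (a.take (i-1)).length = 1 := by simp; omega
      rw [this]
      simp
    rw [htake, hdrop, hdroplast]
    have hstep : a.drop i = v :: a.drop (i+1) := by
      rw [List.drop_eq_getElem_cons hlt]
      congr 1
      exact (List.getD_eq_getElem a ' ' hlt).symm
    rw [hstep]
    simp

lemma innerShiftR_spec : ∀ (k : Nat) (a : List Char), k + 1 ≤ a.length →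
    innerShiftR a ((k : Int) - 1) = a.take 1 ++ a.take k ++ a.drop (k + 1) := by
  intro k
  induction k with
  | zero =>
    intro a _
    rw [innerShiftR, dif_neg (by omega)]
    simpa using (List.take_append_drop 1 a).symm
  | succ k ih =>
    intro a hle
    have hk1 : k + 1 < a.length := by omega
    have hcast : ((k+1 : Nat) : Int) - 1 = (k : Int) := by push_cast; ring
    rw [hcast, innerShiftR, dif_pos (by positivity)]
    have e1 : ((k : Int) + 1).toNat = k + 1 := by omega
    have e2 : (k : Int).toNat = k := by omega
    rw [e1, e2]
    set v := a.getD k ' ' with hv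
    have hlen : (a.set (k+1) v).length = a.length := by simp
    have ih' := ih (a.set (k+1) v) (by omega)
    rw [ih']
    have htake1 : (a.set (k+1) v).take 1 = a.take 1 := by
      rw [List.take_set, List.set_eq_of_length_le (by simp)]
    have htakek : (a.set (k+1) v).take k = a.take k := by
      rw [List.take_set, List.set_eq_of_length_le (by simp)]
    have hdrop : (a.set (k+1) v).drop (k+1) = v :: a.drop (k+2) := by
      rw [List.drop_set, if_neg (by omega), Nat.sub_self, List.drop_eq_getElem_cons hk1]
      rfl
    rw [htake1, htakek, hdrop]
    have hstep : a.take (k+1) = a.take k ++ [v] := by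
      rw [List.take_add_one]
      congr 1
      have hklt : k < a.length := by omega
      simp [List.getElem?_eq_getElem hklt, hv]
    rw [hstep]
    simp

lemma rotStepL_eq (s : List Char) : rotStepL s = s.rotate 1 := by
  match s with
  | [] =>
    show (innerShiftL [] 1).set ((innerShiftL [] 1).length - 1) (([] : List Char).getD 0 ' ') = ([] : List Char).rotate 1
    rw [innerShiftL]
    simp
  | x :: xs =>
    show (innerShiftL (x::xs) 1).set ((innerShiftL (x::xs) 1).length - 1) ((x::xs).getD 0 ' ') = (x::xs).rotate 1
    have hspec := innerShiftL_spec ((x::xs).length - 1) (x::xs) 1 rfl (by omega) (by simp)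
    rw [hspec]
    have hd : (x::xs).drop ((x::xs).length - 1) = [(x::xs).getLast (by simp)] := by
      rw [List.drop_eq_getElem_cons (by simp)]
      simp [List.getLast_eq_getElem]
    rw [hd]
    simp [List.rotate_cons_succ, List.getLast_eq_getElem]

lemma rotStepR_eq (s : List Char) : rotStepR s = s.rotate (s.length - 1) := by
  match s with
  | [] =>
    show (innerShiftR [] ((([] : List Char).length : Int) - 2)).set 0 (([] : List Char).getD (([] : List Char).length - 1) ' ') = ([] : List Char).rotate (([] : List Char).length - 1)
    rw [innerShiftR]
    simp
  | x :: xs =>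
    show (innerShiftR (x::xs) (((x::xs).length : Int) - 2)).set 0 ((x::xs).getD ((x::xs).length - 1) ' ') = (x::xs).rotate ((x::xs).length - 1)
    have hcast : (((x::xs).length : Int)) - 2 = (((x::xs).length - 1 : Nat) : Int) - 1 := by
      have h1 : 1 ≤ (x::xs).length := by simp
      push_cast [h1]
      ring
    rw [hcast]
    have hspec := innerShiftR_spec ((x::xs).length - 1) (x::xs) (by simp)
    rw [hspec]
    have htk : (x::xs).drop ((x::xs).length - 1 + 1) = [] := by
      apply List.drop_eq_nil_of_le; simp
    rw [htk]
    rw [List.rotate_eq_drop_append_take (by omega)]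
    have hd : (x::xs).drop ((x::xs).length - 1) = [(x::xs)[(x::xs).length - 1]] := by
      rw [List.drop_eq_getElem_cons (by simp)]
      simp
    rw [hd]
    have hgd : (x::xs).getD ((x::xs).length - 1) ' ' = (x::xs)[(x::xs).length - 1] :=
      List.getD_eq_getElem _ ' ' (by simp)
    rw [hgd]
    simp [List.set_cons_zero]

lemma foldl_rotStepL (m : Nat) (l : List Char) :
    (List.range m).foldl (fun s _ => rotStepL s) l = l.rotate m := by
  induction m with
  | zero => simp
  | succ m ih =>
    rw [List.range_succ, List.foldl_append, ih]
    simp [rotStepL_eq, List.rotate_rotate]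

lemma foldl_rotStepR (m : Nat) (l : List Char) :
    (List.range m).foldl (fun s _ => rotStepR s) l = l.rotate ((l.length - 1) * m) := by
  induction m with
  | zero => simp
  | succ m ih =>
    rw [List.range_succ, List.foldl_append, ih]
    simp only [List.foldl_cons, List.foldl_nil, rotStepR_eq, List.length_rotate, List.rotate_rotate]
    ring_nf

lemma rotateA_eq (l : List Char) (rot : Int) (hne : l ≠ [] ∨ rot = 0) :
    rotateA l rot =
      (let k := if l.length = 0 then 0 else (PySem.Int.mod rot (l.length : Int)).toNat
       l.drop k ++ l.take k) := by
  rcases Nat.eq_zero_or_pos l.length with h0 | hpos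
  · have : l = [] := List.eq_nil_of_length_eq_zero h0
    subst this
    have hr : rot = 0 := by tauto
    subst hr
    rfl
  · have hn : (0 : Int) < (l.length : Int) := by exact_mod_cast hpos
    have hM0 : 0 ≤ PySem.Int.mod rot (l.length : Int) := PySem.Int.mod_nonneg rot hn
    have hMlt : PySem.Int.mod rot (l.length : Int) < (l.length : Int) := PySem.Int.mod_lt rot hn
    have hmod : PySem.Int.mod rot (l.length : Int) = rot % (l.length : Int) :=
      PySem.Int.mod_eq_emod_of_pos hn
    set k := (PySem.Int.mod rot (l.length : Int)).toNat with hk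
    have hk' : (k : Int) = rot % (l.length : Int) := by
      rw [hk, Int.toNat_of_nonneg hM0, hmod]
    have hklt : k < l.length := by omega
    have hkn : (if l.length = 0 then 0 else k) = k := by rw [if_neg (by omega)]
    simp only [hkn]
    have hrot : l.drop k ++ l.take k = l.rotate k :=
      (List.rotate_eq_drop_append_take (le_of_lt hklt)).symm
    rw [hrot]
    unfold rotateA
    have hself : (k : Int) % (l.length : Int) = (k : Int) := by
      apply Int.emod_eq_of_lt (by omega) (by omega)
    rcases lt_trichotomy rot 0 with hr | hr | hr
    · rw [if_neg (by omega), if_pos hr, foldl_rotStepR]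
      have key : ((l.length - 1) * rot.natAbs) % l.length = k % l.length := by
        have habs : (rot.natAbs : Int) = -rot := by omega
        have hsub : ((l.length - 1 : Nat) : Int) = (l.length : Int) - 1 := by
          push_cast [Nat.cast_sub hpos]
          ring
        refine Nat.cast_inj (R := Int) |>.mp ?_
        push_cast [hsub, habs, hk']
        have e1 : ((l.length : Int) - 1) * (-rot) = rot + (l.length : Int) * (-rot) := by ring
        rw [e1, Int.add_mul_emod_self_left, Int.emod_emod_of_dvd rot dvd_rfl]
      rw [← List.rotate_mod, key, List.rotate_mod]
    · subst hr
      rw [if_neg (by omega), if_neg (by omega)]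
      have : k = 0 := by
        simp only [Int.zero_emod] at hk'
        omega
      rw [this]
      simp
    · rw [if_pos hr, foldl_rotStepL]
      have : rot.toNat % l.length = k := by
        refine Nat.cast_inj (R := Int) |>.mp ?_
        push_cast [hk', Int.toNat_of_nonneg (le_of_lt hr)]
        rfl
      rw [← List.rotate_mod, this]

lemma mainLoopA_zip : ∀ (cs ks : List Char), cs.length ≤ ks.length →
    mainLoopA cs (keytonumA ks) = List.zipWith decCharB cs ks := by
  intro cs
  induction cs with
  | nil => intro ks _; cases ks <;> rfl
  | cons c cs ih =>
    intro ks hle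
    cases ks with
    | nil => simp at hle
    | cons kc ks =>
      simp only [keytonumA, mainLoopA, List.zipWith, decCharB]
      refine congrArg₂ _ ?_ (ih ks (by simpa using hle))
      ring_nf

-- ===== VERDICT (by name: the statement is the Claim_ definition above) =====
theorem solution_spec : Claim_equal_solution := by
  intro e key rot _hdom hpre
  obtain ⟨hlen, hne⟩ := hpre
  unfold Spec_solution
  show solution e key rot = solution_alt e key rot
  simp only [solution, solution_alt]
  rw [PySem.List.foldl_append_singleton, rotateA_eq e.toList rot hne]
  simp only [List.nil_append]
  congr 1
  apply mainLoopA_zip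
  simp only [List.length_append, List.length_drop, List.length_take]
  omega
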